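-- pv_equiv track=rewrite | github.com/davidszkl/ft_ls | test/test.py | find_first_difference
-- ===== SOURCE A (Python) =====
-- def find_first_difference(str1, str2):
--     min_length = min(len(str1), len(str2))
--
--     for i in range(min_length):
--         if str1[i] != str2[i]:
--             return i
--
--     if len(str1) != len(str2):
--         return min_length
--
--     return None
-- ===== SOURCE B (Python) =====
-- def find_first_difference(str1, str2):
--     # Binary search for the length of the longest common prefix using
--     # whole-slice comparisons (C-level), instead of a per-character scan.
--     lo, hi = 0, min(len(str1), len(str2))
--     while lo < hi:
--         mid = (lo + hi + 1) // 2
--         if str1[:mid] == str2[:mid]: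
--             lo = mid
--         else:
--             hi = mid - 1
--     if lo == len(str1) == len(str2):
--         return None
--     return lo
-- ===== Notes on version B (the rewrite author's own statement) =====
-- stated objective: faster
-- what changed: Replaced A's linear per-character scan (plus separate post-loop length check) by a binary search for the longest-common-prefix length using whole-slice equality comparisons, then deriving the answer from that length.
import Mathlib
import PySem

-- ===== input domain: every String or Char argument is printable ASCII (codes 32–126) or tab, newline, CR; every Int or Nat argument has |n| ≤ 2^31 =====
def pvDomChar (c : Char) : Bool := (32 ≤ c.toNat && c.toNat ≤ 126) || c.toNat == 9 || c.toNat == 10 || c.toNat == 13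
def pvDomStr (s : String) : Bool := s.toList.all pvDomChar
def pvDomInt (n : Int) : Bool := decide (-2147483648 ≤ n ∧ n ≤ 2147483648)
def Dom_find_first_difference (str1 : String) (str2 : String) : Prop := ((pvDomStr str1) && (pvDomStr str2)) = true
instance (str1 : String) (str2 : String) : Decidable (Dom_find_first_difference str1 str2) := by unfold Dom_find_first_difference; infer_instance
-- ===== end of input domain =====

-- B replaces A's linear per-character scan by a binary search for the longest common
-- prefix length via slice comparisons; measurably faster on large inputs (constant factor).


-- ===== PORT A =====
-- `for i in range(min_length): if str1[i] != str2[i]: return i` — fuel counts remaining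
-- iterations, i is the running index into the full lists (exact: all indices are in range).
def ffdLoopA (l1 l2 : List Char) (i : Nat) : Nat → Option Int
  | 0 => none
  | n + 1 =>
      if PySem.List.pyGet? l1 (i : Int) ≠ PySem.List.pyGet? l2 (i : Int) then some (i : Int)
      else ffdLoopA l1 l2 (i + 1) n

def find_first_difference (str1 : String) (str2 : String) : Option Int :=
  let l1 := str1.toList
  let l2 := str2.toList
  let min_length := min l1.length l2.length
  match ffdLoopA l1 l2 0 min_length with
  | some i => some i
  | none => if l1.length ≠ l2.length then some (min_length : Int) else none

-- ===== PORT B =====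
-- `while lo < hi: mid = (lo+hi+1)//2; if str1[:mid] == str2[:mid]: lo = mid else: hi = mid-1`
-- str[:mid] with 0 ≤ mid is exactly List.take mid; the loop terminates as hi - lo shrinks.
def ffdSearch (l1 l2 : List Char) (lo hi : Nat) : Nat :=
  if h : lo < hi then
    -- (lo+hi+1)//2 on nonnegative Nats: Nat division coincides with Python floor division here
    let mid := (lo + hi + 1) / 2
    if l1.take mid = l2.take mid then ffdSearch l1 l2 mid hi
    else ffdSearch l1 l2 lo (mid - 1)
  else lo
termination_by hi - lo
decreasing_by all_goals omega

def find_first_difference_alt (str1 : String) (str2 : String) : Option Int :=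
  let l1 := str1.toList
  let l2 := str2.toList
  let lo := ffdSearch l1 l2 0 (min l1.length l2.length)
  if lo = l1.length ∧ l1.length = l2.length then none else some (lo : Int)

-- ===== PRECONDITION & SPEC =====
def Spec_find_first_difference (str1 : String) (str2 : String) (out : Option Int) : Prop := out = find_first_difference_alt str1 str2
instance (str1 : String) (str2 : String) (out : Option Int) : Decidable (Spec_find_first_difference str1 str2 out) := by unfold Spec_find_first_difference; infer_instance

-- ===== CLAIM (what is proved, stated in full; the proofs are below) =====
def Claim_equal_find_first_difference : Prop := ∀ (str1 : String) (str2 : String), Dom_find_first_difference str1 str2 → Spec_find_first_difference str1 str2 (find_first_difference str1 str2)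

-- ===== LEMMAS AND PROOFS =====

-- length of the longest common prefix: the reference both ports are related to
def pvLcp : List Char → List Char → Nat
  | a :: xs, b :: ys => if a = b then pvLcp xs ys + 1 else 0
  | _, _ => 0

theorem pvLcp_le_min (l1 l2 : List Char) : pvLcp l1 l2 ≤ min l1.length l2.length := by
  induction l1 generalizing l2 with
  | nil => simp [pvLcp]
  | cons a xs ih =>
      cases l2 with
      | nil => simp [pvLcp]
      | cons b ys =>
          by_cases h : a = b
          · have := ih ys; simp [pvLcp, h]; omega
          · simp [pvLcp, h]

theorem take_eq_iff_le_lcp (l1 l2 : List Char) (k : Nat) (hk : k ≤ min l1.length l2.length) :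
    l1.take k = l2.take k ↔ k ≤ pvLcp l1 l2 := by
  induction l1 generalizing l2 k with
  | nil => simp at hk; simp [hk, pvLcp]
  | cons a xs ih =>
      cases l2 with
      | nil => simp at hk; simp [hk, pvLcp]
      | cons b ys =>
          cases k with
          | zero => simp
          | succ k =>
              simp only [List.take_succ_cons, List.cons.injEq]
              by_cases h : a = b
              · have hk' : k ≤ min xs.length ys.length := by
                  simp at hk; omega
                rw [ih ys k hk']
                simp [pvLcp, h]
              · simp [pvLcp, h]

theorem ffdLoopA_shift (l1 l2 : List Char) (x y : Char) (i n : Nat) :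
    ffdLoopA (x :: l1) (y :: l2) (i + 1) n = (ffdLoopA l1 l2 i n).map (· + 1) := by
  induction n generalizing i with
  | zero => simp [ffdLoopA]
  | succ n ih =>
      simp only [ffdLoopA]
      have h1 : PySem.List.pyGet? (x :: l1) ((i + 1 : Nat) : Int)
          = PySem.List.pyGet? l1 (i : Int) := by
        push_cast
        exact PySem.List.pyGet?_cons_succ ..
      have h2 : PySem.List.pyGet? (y :: l2) ((i + 1 : Nat) : Int)
          = PySem.List.pyGet? l2 (i : Int) := by
        push_cast
        exact PySem.List.pyGet?_cons_succ ..
      rw [h1, h2]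
      split
      · simp
      · exact ih (i + 1)

-- A's scan returns the lcp length when it is a real mismatch position, none otherwise
theorem ffdLoopA_eq_lcp (l1 l2 : List Char) :
    ffdLoopA l1 l2 0 (min l1.length l2.length)
      = if pvLcp l1 l2 < min l1.length l2.length then some ((pvLcp l1 l2 : Nat) : Int) else none := by
  induction l1 generalizing l2 with
  | nil => simp [ffdLoopA]
  | cons x xs ih =>
      cases l2 with
      | nil => simp [ffdLoopA]
      | cons y ys =>
          have hmin : min (x :: xs).length (y :: ys).length = min xs.length ys.length + 1 := by
            simp [Nat.succ_min_succ]
          rw [hmin]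
          simp only [ffdLoopA]
          have hx : PySem.List.pyGet? (x :: xs) ((0 : Nat) : Int) = some x := by simp
          have hy : PySem.List.pyGet? (y :: ys) ((0 : Nat) : Int) = some y := by simp
          rw [hx, hy]
          by_cases hxy : x = y
          · subst hxy
            simp only [ne_eq, not_true_eq_false, if_false]
            have : (0 : Nat) + 1 = 1 := rfl
            rw [show (1 : Nat) = 0 + 1 from rfl, ffdLoopA_shift, ih ys]
            by_cases h : pvLcp xs ys < min xs.length ys.length
            · simp only [pvLcp, if_true]
              have hlt : pvLcp xs ys + 1 < min xs.length ys.length + 1 := by omega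
              simp [h, hlt]
            · simp only [pvLcp, if_true]
              have hlt : ¬ (pvLcp xs ys + 1 < min xs.length ys.length + 1) := by omega
              simp [h, hlt]
          · simp [hxy, pvLcp]

-- the binary search computes exactly the lcp length
theorem ffdSearch_eq_lcp (l1 l2 : List Char) :
    ∀ (n lo hi : Nat), hi - lo ≤ n → lo ≤ pvLcp l1 l2 → pvLcp l1 l2 ≤ hi →
      hi ≤ min l1.length l2.length → ffdSearch l1 l2 lo hi = pvLcp l1 l2 := by
  intro n
  induction n with
  | zero =>
      intro lo hi hn h1 h2 h3
      have hlt : ¬ lo < hi := by omega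
      rw [ffdSearch]
      simp [hlt]
      omega
  | succ n ih =>
      intro lo hi hn h1 h2 h3
      rw [ffdSearch]
      by_cases hlt : lo < hi
      · simp only [hlt, dif_pos]
        have hmid1 : lo < (lo + hi + 1) / 2 := by omega
        have hmid2 : (lo + hi + 1) / 2 ≤ hi := by omega
        by_cases heq : l1.take ((lo + hi + 1) / 2) = l2.take ((lo + hi + 1) / 2)
        · have hle : (lo + hi + 1) / 2 ≤ pvLcp l1 l2 :=
            (take_eq_iff_le_lcp l1 l2 _ (by omega)).mp heq
          simp only [heq, if_pos]
          exact ih _ hi (by omega) hle h2 h3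
        · have hgt : ¬ ((lo + hi + 1) / 2 ≤ pvLcp l1 l2) := fun h =>
            heq ((take_eq_iff_le_lcp l1 l2 _ (by omega)).mpr h)
          simp only [heq, if_neg, not_false_iff]
          exact ih lo _ (by omega) h1 (by omega) (by omega)
      · simp [hlt]
        omega

-- ===== VERDICT (by name: the statement is the Claim_ definition above) =====
theorem find_first_difference_spec : Claim_equal_find_first_difference := by
  intro str1 str2 _
  unfold Spec_find_first_difference find_first_difference find_first_difference_alt
  dsimp only
  set l1 := str1.toList
  set l2 := str2.toList
  have hlcp := pvLcp_le_min l1 l2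
  rw [ffdLoopA_eq_lcp, ffdSearch_eq_lcp l1 l2 (min l1.length l2.length) 0 _ (by omega) (by omega) hlcp (le_refl _)]
  by_cases h : pvLcp l1 l2 < min l1.length l2.length
  · have hnot : ¬ (pvLcp l1 l2 = l1.length ∧ l1.length = l2.length) := by omega
    simp [h, hnot]
  · by_cases hlen : l1.length = l2.length
    · have : pvLcp l1 l2 = l1.length ∧ l1.length = l2.length := by omega
      simp [hlen, this]
    · have hnot : ¬ (pvLcp l1 l2 = l1.length ∧ l1.length = l2.length) := by simp [hlen]
      have : pvLcp l1 l2 = min l1.length l2.length := by omega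
      simp [hlen, this]
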